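-- pv_equiv track=rewrite | github.com/SvenAnton/py_basics | pr07_shortest_way_back/shortest_way_back.py | shortest_way_back
-- ===== SOURCE A (Python) =====
-- def calculate_new_pos(path: str):
--     """Arvutab uue positsiooni path juhistest l2htuvalt."""
--     liikumine = {"N": (1, 0), "S": (-1, 0), "E": (0, 1), "W": (0, -1)}
--     lat = 0
--     long = 0
--
--     for movement in path:
--         if movement == "N":
--             lat += liikumine["N"][0]
--         if movement == "S":
--             lat += liikumine["S"][0]
--         if movement == "E":
--             long += liikumine["E"][1]
--         if movement == "W":
--             long += liikumine["W"][1]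
--     return lat, long
--
-- def shortest_way_back(path: str) -> str:
--     """
--     Find the shortest way back in a taxicab geometry.
--
--     :param path: string of moves, where moves are encoded as follows:.
--     N - north -  (1, 0)
--     S - south -  (-1, 0)
--     E - east  -  (0, 1)
--     W - west  -  (0, -1)
--     (first coordinate indicates steps towards north,
--     second coordinate indicates steps towards east)
--
--     :return: the shortest way back encoded the same way as :param path:.
--     """
--     lat = calculate_new_pos(path)[0]
--     long = calculate_new_pos(path)[1]
--
--     way_back = ""
--     while lat != 0 or long != 0:
--
--         if lat > 0:
--             way_back += "S"
--             lat -= 1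
--         elif lat < 0:
--             way_back += "N"
--             lat += 1
--
--         if long > 0:
--             way_back += "W"
--             long -= 1
--         elif long < 0:
--             way_back += "E"
--             long += 1
--
--     return way_back
-- ===== SOURCE B (Python) =====
-- def shortest_way_back(path: str) -> str:
--     """Shortest taxicab way back: counts instead of a decrement loop, block
--     construction + interleave instead of simultaneous while-loop appends."""
--     lat = path.count("N") - path.count("S")
--     long = path.count("E") - path.count("W")
--     lat_block = ("S" if lat > 0 else "N") * abs(lat)
--     long_block = ("W" if long > 0 else "E") * abs(long)
--     n = min(len(lat_block), len(long_block))
--     pairs = "".join(a + b for a, b in zip(lat_block, long_block))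
--     return pairs + lat_block[n:] + long_block[n:]
-- ===== Notes on version B (the rewrite author's own statement) =====
-- stated objective: simpler
-- what changed: A walks the net displacement step by step in a while loop, decrementing two counters and appending one or two characters per iteration; B computes the displacement from four letter counts, builds the full 'S'/'N' and 'W'/'E' blocks at once and interleaves them with zip plus the leftover tails.
import Mathlib
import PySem

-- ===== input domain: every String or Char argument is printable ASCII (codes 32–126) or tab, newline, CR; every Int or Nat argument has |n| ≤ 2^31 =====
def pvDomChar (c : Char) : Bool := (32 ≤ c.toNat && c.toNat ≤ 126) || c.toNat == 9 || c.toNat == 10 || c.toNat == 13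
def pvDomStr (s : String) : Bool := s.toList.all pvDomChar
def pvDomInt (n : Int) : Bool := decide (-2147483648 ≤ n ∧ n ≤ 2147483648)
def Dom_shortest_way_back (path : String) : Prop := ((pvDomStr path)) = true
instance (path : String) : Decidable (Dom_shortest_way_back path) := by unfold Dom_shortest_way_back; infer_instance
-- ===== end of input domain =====

-- B replaces A's per-step while loop by counting the four move letters and
-- interleaving two direction blocks (objective: simpler decomposition).


-- ===== PORT A =====
-- dict liikumine = {"N": (1, 0), "S": (-1, 0), "E": (0, 1), "W": (0, -1)}
def liikumine : PySem.Dict String (Int × Int) :=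
  PySem.Dict.ofList [("N", (1, 0)), ("S", (-1, 0)), ("E", (0, 1)), ("W", (0, -1))]

-- literal port of calculate_new_pos (four independent ifs, dict lookups; the
-- keys are literals so the lookup never fails and getD's default is unreachable)
def calcStep (p : Int × Int) (movement : Char) : Int × Int :=
  let p := if movement = 'N' then (p.1 + (PySem.Dict.getD liikumine "N" (0, 0)).1, p.2) else p
  let p := if movement = 'S' then (p.1 + (PySem.Dict.getD liikumine "S" (0, 0)).1, p.2) else p
  let p := if movement = 'E' then (p.1, p.2 + (PySem.Dict.getD liikumine "E" (0, 0)).2) else p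
  let p := if movement = 'W' then (p.1, p.2 + (PySem.Dict.getD liikumine "W" (0, 0)).2) else p
  p

def calculate_new_pos (path : String) : Int × Int :=
  path.toList.foldl calcStep (0, 0)

-- the while loop of shortest_way_back, one iteration = one recursive step
def wayBackLoop (lat long : Int) : List Char :=
  if lat = 0 ∧ long = 0 then []
  else
    (if lat > 0 then ['S'] else if lat < 0 then ['N'] else [])
    ++ (if long > 0 then ['W'] else if long < 0 then ['E'] else [])
    ++ wayBackLoop (if lat > 0 then lat - 1 else if lat < 0 then lat + 1 else lat)
                   (if long > 0 then long - 1 else if long < 0 then long + 1 else long)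
termination_by lat.natAbs + long.natAbs
decreasing_by
  simp only [not_and_or] at *
  split_ifs <;> omega

def shortest_way_back (path : String) : String :=
  String.ofList (wayBackLoop (calculate_new_pos path).1 (calculate_new_pos path).2)

-- ===== PORT B =====
def shortest_way_back_alt (path : String) : String :=
  let lat : Int := (PySem.Str.count path "N" : Int) - (PySem.Str.count path "S" : Int)
  let long : Int := (PySem.Str.count path "E" : Int) - (PySem.Str.count path "W" : Int)
  let latBlock := List.replicate lat.natAbs (if lat > 0 then 'S' else 'N')
  let longBlock := List.replicate long.natAbs (if long > 0 then 'W' else 'E')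
  let n := min latBlock.length longBlock.length
  String.ofList ((((latBlock.zip longBlock).flatMap fun p => [p.1, p.2]))
    ++ latBlock.drop n ++ longBlock.drop n)

-- ===== PRECONDITION & SPEC =====
def Spec_shortest_way_back (path : String) (out : String) : Prop := out = shortest_way_back_alt path
instance (path : String) (out : String) : Decidable (Spec_shortest_way_back path out) := by unfold Spec_shortest_way_back; infer_instance

-- ===== CLAIM (what is proved, stated in full; the proofs are below) =====
def Claim_equal_shortest_way_back : Prop := ∀ (path : String), Dom_shortest_way_back path → Spec_shortest_way_back path (shortest_way_back path)

-- ===== LEMMAS AND PROOFS =====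

-- proof-side merge of the two blocks (what both programs compute)
def mergeIL : List Char → List Char → List Char
  | [], b => b
  | a, [] => a
  | x :: xs, y :: ys => x :: y :: mergeIL xs ys

theorem mergeIL_nil_right (a : List Char) : mergeIL a [] = a := by
  cases a <;> rfl

theorem zip_flat_drop_eq_mergeIL (a b : List Char) :
    ((a.zip b).flatMap fun p => [p.1, p.2])
      ++ a.drop (min a.length b.length) ++ b.drop (min a.length b.length) = mergeIL a b := by
  induction a generalizing b with
  | nil => simp [mergeIL]
  | cons x xs ih =>
    cases b with
    | nil => simp [mergeIL]
    | cons y ys =>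
      have hmin : min (xs.length + 1) (ys.length + 1) = min xs.length ys.length + 1 := by omega
      simp [mergeIL, List.zip_cons_cons, hmin, ← ih ys]

def latRep (lat : Int) : List Char := List.replicate lat.natAbs (if lat > 0 then 'S' else 'N')
def longRep (long : Int) : List Char := List.replicate long.natAbs (if long > 0 then 'W' else 'E')

theorem latRep_pos {lat : Int} (h : 0 < lat) : latRep lat = 'S' :: latRep (lat - 1) := by
  by_cases h1 : lat = 1
  · subst h1; decide
  · unfold latRep
    have h2 : lat.natAbs = (lat - 1).natAbs + 1 := by omega
    rw [h2, List.replicate_succ, if_pos h, if_pos (by omega : (0:Int) < lat - 1)]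

theorem latRep_neg {lat : Int} (h : lat < 0) : latRep lat = 'N' :: latRep (lat + 1) := by
  by_cases h1 : lat = -1
  · subst h1; decide
  · unfold latRep
    have h2 : lat.natAbs = (lat + 1).natAbs + 1 := by omega
    rw [h2, List.replicate_succ, if_neg (by omega), if_neg (by omega)]

theorem longRep_pos {long : Int} (h : 0 < long) : longRep long = 'W' :: longRep (long - 1) := by
  by_cases h1 : long = 1
  · subst h1; decide
  · unfold longRep
    have h2 : long.natAbs = (long - 1).natAbs + 1 := by omega
    rw [h2, List.replicate_succ, if_pos h, if_pos (by omega : (0:Int) < long - 1)]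

theorem longRep_neg {long : Int} (h : long < 0) : longRep long = 'E' :: longRep (long + 1) := by
  by_cases h1 : long = -1
  · subst h1; decide
  · unfold longRep
    have h2 : long.natAbs = (long + 1).natAbs + 1 := by omega
    rw [h2, List.replicate_succ, if_neg (by omega), if_neg (by omega)]

theorem latRep_zero : latRep 0 = [] := rfl
theorem longRep_zero : longRep 0 = [] := rfl

theorem wayBackLoop_eq_mergeIL (lat long : Int) :
    wayBackLoop lat long = mergeIL (latRep lat) (longRep long) := by
  fun_induction wayBackLoop lat long with
  | case1 lat long h =>
    obtain ⟨h1, h2⟩ := h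
    subst h1; subst h2
    simp [latRep_zero, longRep_zero, mergeIL]
  | case2 lat long h ih =>
    split_ifs at ih ⊢
    · -- lat > 0, long > 0
      rw [latRep_pos (by omega), longRep_pos (by omega)]
      simp [mergeIL, ih]
    · -- lat > 0, long < 0
      rw [latRep_pos (by omega), longRep_neg (by omega)]
      simp [mergeIL, ih]
    · -- lat > 0, long = 0
      have hz : long = 0 := by omega
      subst hz
      rw [latRep_pos (by omega)]
      simp [mergeIL, ih, longRep_zero, mergeIL_nil_right]
    · -- lat < 0, long > 0
      rw [latRep_neg (by omega), longRep_pos (by omega)]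
      simp [mergeIL, ih]
    · -- lat < 0, long < 0
      rw [latRep_neg (by omega), longRep_neg (by omega)]
      simp [mergeIL, ih]
    · -- lat < 0, long = 0
      have hz : long = 0 := by omega
      subst hz
      rw [latRep_neg (by omega)]
      simp [mergeIL, ih, longRep_zero, mergeIL_nil_right]
    · -- lat = 0, long > 0
      have hz : lat = 0 := by omega
      subst hz
      rw [longRep_pos (by omega)]
      simp [mergeIL, ih, latRep_zero]
    · -- lat = 0, long < 0
      have hz : lat = 0 := by omega
      subst hz
      rw [longRep_neg (by omega)]
      simp [mergeIL, ih, latRep_zero]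
    · -- lat = 0, long = 0: contradicts h
      exfalso
      exact h ⟨by omega, by omega⟩

-- PySem.Chars.count with a single-character needle is List.count
theorem count_go_singleton (c : Char) :
    ∀ (fuel : Nat) (l : List Char) (acc : Nat), l.length ≤ fuel →
      PySem.Chars.count.go [c] fuel l acc = acc + l.count c := by
  intro fuel
  induction fuel with
  | zero =>
    intro l acc h
    have : l = [] := List.eq_nil_of_length_eq_zero (by omega)
    subst this
    simp [PySem.Chars.count.go]
  | succ n ih =>
    intro l acc h
    cases l with
    | nil => simp [PySem.Chars.count.go]
    | cons x t =>
      by_cases hx : c = x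
      · subst hx
        rw [show PySem.Chars.count.go [c] (n + 1) (c :: t) acc
              = PySem.Chars.count.go [c] n t (acc + 1) from by
            simp [PySem.Chars.count.go, List.isPrefixOf, List.drop_one]]
        rw [ih t (acc + 1) (by simpa using h)]
        simp [List.count_cons]
        omega
      · rw [show PySem.Chars.count.go [c] (n + 1) (x :: t) acc
              = PySem.Chars.count.go [c] n t acc from by
            simp [PySem.Chars.count.go, List.isPrefixOf, hx]]
        rw [ih t acc (by simpa using h)]
        simp [List.count_cons, Ne.symm hx]

theorem chars_count_singleton (s : List Char) (c : Char) :
    PySem.Chars.count s [c] = s.count c := by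
  unfold PySem.Chars.count
  rw [if_neg (by simp), count_go_singleton c s.length s 0 (by omega)]
  omega

theorem str_count_singleton (path : String) (c : Char) (s : String)
    (hs : s.toList = [c]) :
    PySem.Str.count path s = path.toList.count c := by
  rw [PySem.Str.count_eq, hs, chars_count_singleton]

theorem calcStep_none (a b : Int) (x : Char)
    (h1 : x ≠ 'N') (h2 : x ≠ 'S') (h3 : x ≠ 'E') (h4 : x ≠ 'W') :
    calcStep (a, b) x = (a, b) := by
  simp [calcStep, h1, h2, h3, h4]

-- the fold of calculate_new_pos counts the four letters
theorem calc_spec (l : List Char) : ∀ (a b : Int),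
    l.foldl calcStep (a, b)
      = (a + l.count 'N' - l.count 'S', b + l.count 'E' - l.count 'W') := by
  have hN : PySem.Dict.getD liikumine "N" ((0:Int), (0:Int)) = (1, 0) := by decide
  have hS : PySem.Dict.getD liikumine "S" ((0:Int), (0:Int)) = (-1, 0) := by decide
  have hE : PySem.Dict.getD liikumine "E" ((0:Int), (0:Int)) = (0, 1) := by decide
  have hW : PySem.Dict.getD liikumine "W" ((0:Int), (0:Int)) = (0, -1) := by decide
  induction l with
  | nil => intro a b; simp
  | cons x t ih =>
    intro a b
    rw [List.foldl_cons]
    by_cases h1 : x = 'N'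
    · subst h1
      rw [show calcStep (a, b) 'N' = (a + 1, b) from by simp [calcStep, hN, hS, hE, hW], ih]
      simp [List.count_cons, Prod.ext_iff]
      push_cast
      omega
    · by_cases h2 : x = 'S'
      · subst h2
        rw [show calcStep (a, b) 'S' = (a + -1, b) from by simp [calcStep, hN, hS, hE, hW], ih]
        simp [List.count_cons, Prod.ext_iff]
        push_cast
        omega
      · by_cases h3 : x = 'E'
        · subst h3
          rw [show calcStep (a, b) 'E' = (a, b + 1) from by simp [calcStep, hN, hS, hE, hW], ih]
          simp [List.count_cons, Prod.ext_iff]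
          push_cast
          omega
        · by_cases h4 : x = 'W'
          · subst h4
            rw [show calcStep (a, b) 'W' = (a, b + -1) from by simp [calcStep, hN, hS, hE, hW], ih]
            simp [List.count_cons, Prod.ext_iff]
            push_cast
            omega
          · rw [calcStep_none a b x h1 h2 h3 h4, ih]
            simp [List.count_cons, Prod.ext_iff, h1, h2, h3, h4]

theorem calc_pos_eq (path : String) :
    calculate_new_pos path =
      ((path.toList.count 'N' : Int) - path.toList.count 'S',
       (path.toList.count 'E' : Int) - path.toList.count 'W') := by
  unfold calculate_new_pos
  rw [calc_spec]
  simp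

-- ===== VERDICT (by name: the statement is the Claim_ definition above) =====
theorem shortest_way_back_spec : Claim_equal_shortest_way_back := by
  intro path _
  show shortest_way_back path = shortest_way_back_alt path
  simp only [shortest_way_back, shortest_way_back_alt]
  rw [str_count_singleton path 'N' "N" rfl, str_count_singleton path 'S' "S" rfl,
      str_count_singleton path 'E' "E" rfl, str_count_singleton path 'W' "W" rfl,
      calc_pos_eq, wayBackLoop_eq_mergeIL, ← zip_flat_drop_eq_mergeIL]
  rfl
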